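-- pv_equiv track=rewrite | github.com/AlexKI123/Wright-Fisher-with-recombination | Finite_L/Prob_allConnected.py | giantComponentExists
-- ===== SOURCE A (Python) =====
-- def giantComponentExists(nums):
--     # Construct a graph as a dictionary
--     graph = {n:[] for n in nums}
--
--     # Add edges between nodes
--     for n1 in nums:
--         for n2 in nums:
--             if bin(n1^n2).count("1") == 1:  #compare if binary rep. differs at one position
--                 graph[n1].append(n2)
--
--     # BFS search to determine if graph is fully connected
--     fringe = [min(nums)]
--     visited = set()
--     while fringe:
--         for edge in graph[fringe[0]]:
--             if edge not in visited:
--                 fringe += [edge]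
--         visited.add(fringe[0])
--         fringe.pop(0)
--     return len(visited) == len(graph.keys())
-- ===== SOURCE B (Python) =====
-- def _adj(a, b):
--     # nodes are adjacent iff their binary representations differ in exactly one position
--     t = abs(a ^ b)
--     c = 0
--     while t:
--         c += t & 1
--         t >>= 1
--     return c == 1
--
-- def giantComponentExists(nums):
--     # distinct values in first-occurrence order
--     vals = []
--     for n in nums:
--         if n not in vals:
--             vals.append(n)
--     # grow the component of the minimum level by level: no adjacency lists, no queue;
--     # each round keeps only the values not yet reached and stops as soon as no level grows
--     start = min(nums)
--     remaining = [v for v in vals if v != start]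
--     frontier = [start]
--     while frontier:
--         frontier = [m for m in remaining if any(_adj(m, f) for f in frontier)]
--         remaining = [m for m in remaining if m not in frontier]
--     return not remaining
-- ===== Notes on version B (the rewrite author's own statement) =====
-- stated objective: faster
-- what changed: A builds an explicit adjacency-list dict with a double loop over the raw list (string-based popcount) and runs a queue BFS from the minimum; B builds no graph at all: it deduplicates once and grows the component of the minimum level by level, each round testing only the not-yet-reached values against the previous frontier and stopping as soon as a level is empty.
import Mathlib
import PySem

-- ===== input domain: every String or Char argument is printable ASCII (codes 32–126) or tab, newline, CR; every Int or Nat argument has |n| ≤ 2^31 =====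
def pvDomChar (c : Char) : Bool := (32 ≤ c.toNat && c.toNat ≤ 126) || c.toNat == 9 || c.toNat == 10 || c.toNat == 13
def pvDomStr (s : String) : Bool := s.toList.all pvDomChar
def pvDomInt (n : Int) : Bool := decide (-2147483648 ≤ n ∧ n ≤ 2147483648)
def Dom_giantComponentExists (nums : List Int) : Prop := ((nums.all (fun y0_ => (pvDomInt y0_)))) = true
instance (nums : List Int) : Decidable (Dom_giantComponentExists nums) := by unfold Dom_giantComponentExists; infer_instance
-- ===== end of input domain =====

-- B replaces A's quadratic adjacency-list build plus queue BFS by a graph-free fixpoint iteration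
-- growing the component of the minimum (alternative algorithm, same exact return value).

-- ===== PORT A =====

def pvCondA (a b : Int) : Bool :=
  PySem.Str.count (PySem.Int.pyBin (PySem.Int.bxor a b)) "1" == 1

def pvGraph (nums : List Int) : PySem.Dict Int (List Int) :=
  let g0 := nums.foldl (fun g n => g.insert n ([] : List Int)) PySem.Dict.empty
  nums.foldl (fun g n1 =>
    nums.foldl (fun g n2 => if pvCondA n1 n2 then g.modify n1 [] (· ++ [n2]) else g) g) g0

theorem pvG0_getD (l : List Int) (g : PySem.Dict Int (List Int)) (v : Int)
    (h : g.getD v [] = []) :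
    (l.foldl (fun g n => g.insert n ([] : List Int)) g).getD v [] = [] := by
  induction l generalizing g with
  | nil => exact h
  | cons a t ih =>
    refine ih _ ?_
    rw [PySem.Dict.getD_insert]
    split <;> simp [h]

theorem pvInner_getD (nums : List Int) (n1 : Int) (g : PySem.Dict Int (List Int)) (c : Int) :
    (nums.foldl (fun g n2 => if pvCondA n1 n2 then g.modify n1 [] (· ++ [n2]) else g) g).getD c []
      = g.getD c [] ++ (if c = n1 then nums.filter (fun n2 => pvCondA n1 n2) else []) := by
  rw [PySem.List.foldl_if_eq_foldl_filter]
  rw [← List.foldl_map (f := fun n2 => ((n1, n2) : Int × Int))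
        (g := fun (d : PySem.Dict Int (List Int)) p => d.modify p.1 [] (· ++ [p.2]))]
  rw [PySem.Dict.getD_foldl_modify_append]
  congr 1
  rw [List.filter_map]
  by_cases hc : c = n1
  · subst hc
    simp [Function.comp]
  · have hb : (n1 == c) = false := by simp [Ne.symm hc]
    simp [Function.comp, hb, hc]

theorem pvOuter_mem (nums : List Int) :
    ∀ (l : List Int) (g : PySem.Dict Int (List Int)) (v m : Int),
    (m ∈ (l.foldl (fun g n1 =>
        nums.foldl (fun g n2 => if pvCondA n1 n2 then g.modify n1 [] (· ++ [n2]) else g) g) g).getD v [])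
      ↔ m ∈ g.getD v [] ∨ (v ∈ l ∧ m ∈ nums ∧ pvCondA v m = true) := by
  intro l
  induction l with
  | nil => simp
  | cons a t ih =>
    intro g v m
    rw [List.foldl_cons, ih]
    rw [pvInner_getD]
    by_cases hv : v = a
    · subst hv
      simp [List.mem_filter]
      tauto
    · simp only [if_neg hv, List.append_nil, List.mem_cons]
      constructor
      · rintro (h | h)
        · exact Or.inl h
        · exact Or.inr ⟨Or.inr h.1, h.2⟩
      · rintro (h | ⟨(h1 | h1), h2⟩)
        · exact Or.inl h
        · exact absurd h1 hv
        · exact Or.inr ⟨h1, h2⟩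

theorem pvGraph_getD_mem (nums : List Int) (v m : Int) :
    m ∈ (pvGraph nums).getD v [] ↔ v ∈ nums ∧ m ∈ nums ∧ pvCondA v m = true := by
  unfold pvGraph
  rw [pvOuter_mem]
  rw [pvG0_getD nums PySem.Dict.empty v (by simp [PySem.Dict.getD_empty])]
  simp

theorem pvGraph_values_mem (nums : List Int) :
    ∀ v m : Int, m ∈ (pvGraph nums).getD v [] → m ∈ nums := by
  intro v m h
  exact ((pvGraph_getD_mem nums v m).mp h).2.1

theorem pvFilterLtLength {l : List Int} {p q : Int → Bool}
    (himp : ∀ a, q a = true → p a = true) {a : Int}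
    (ha : a ∈ l) (hp : p a = true) (hq : q a = false) :
    (l.filter q).length < (l.filter p).length := by
  induction l with
  | nil => simp at ha
  | cons b t ih =>
    have hmono : (t.filter q).length ≤ (t.filter p).length :=
      (List.monotone_filter_right t (by intro x hx; exact himp x hx)).length_le
    rcases List.mem_cons.mp ha with rfl | hat
    · simp [List.filter_cons, hp, hq]
      omega
    · by_cases hqb : q b = true
      · simp [List.filter_cons, hqb, himp b hqb, ih hat]
      · have hqb' : q b = false := by simp [hqb]
        by_cases hpb : p b = true
        · simp [List.filter_cons, hqb', hpb]
          have := ih hat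
          omega
        · simp [List.filter_cons, hqb', hpb, ih hat]

def pvBfs (nums : List Int) (graph : PySem.Dict Int (List Int))
    (hg : ∀ v m : Int, m ∈ graph.getD v [] → m ∈ nums)
    (fringe : List Int) (visited : PySem.Set Int)
    (hf : ∀ x ∈ fringe, x ∈ nums) : PySem.Set Int :=
  match fringe with
  | [] => visited
  | f :: rest =>
    pvBfs nums graph hg
      (rest ++ (graph.getD f []).filter (fun e => !(PySem.Set.contains visited e)))
      (PySem.Set.add visited f)
      (by intro x hx
          rcases List.mem_append.mp hx with h | h
          · exact hf x (List.mem_cons_of_mem _ h)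
          · exact hg f x (List.mem_of_mem_filter h))
termination_by ((nums.filter (fun k => !(PySem.Set.contains visited k))).length,
                fringe.countP (fun x => PySem.Set.contains visited x))
decreasing_by
  by_cases hv : PySem.Set.contains visited f = true
  · have hadd : PySem.Set.add visited f = visited :=
      PySem.Set.add_of_mem (PySem.Set.contains_iff visited f |>.mp hv)
    rw [hadd]
    apply Prod.Lex.right
    rw [List.countP_append, List.countP_cons]
    have h0 : ((graph.getD f []).filter (fun e => !(PySem.Set.contains visited e))).countP
        (fun x => PySem.Set.contains visited x) = 0 := by
      rw [List.countP_eq_zero]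
      intro a ha
      simpa using List.of_mem_filter ha
    rw [h0, hv]
    simp
  · apply Prod.Lex.left
    apply pvFilterLtLength (a := f)
    · intro a ha
      have h1 : a ∉ PySem.Set.add visited f := by simpa using ha
      have h2 : a ∉ visited := fun h => h1 (by rw [PySem.Set.mem_add]; exact Or.inl h)
      simpa using h2
    · exact hf f List.mem_cons_self
    · simpa using hv
    · have h3 : f ∈ PySem.Set.add visited f := by rw [PySem.Set.mem_add]; exact Or.inr rfl
      simpa using h3

def giantComponentExists (nums : List Int) : Bool :=
  let graph := pvGraph nums
  match hm : PySem.List.min? nums (fun x => x) with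
  | none => false   -- Python: min([]) raises ValueError; excluded by Pre_
  | some m0 =>
    let visited := pvBfs nums graph (pvGraph_values_mem nums) [m0] PySem.Set.empty
      (by intro x hx
          rw [List.mem_singleton] at hx
          subst hx
          exact PySem.List.min?_mem hm)
    PySem.Set.len visited == PySem.List.len graph.keys

-- ===== PORT B =====

def pvPopcGo (t c : Nat) : Nat :=
  if t = 0 then c else pvPopcGo (t >>> 1) (c + (t &&& 1))
termination_by t
decreasing_by
  rw [Nat.shiftRight_one]
  omega

def pvAdj (a b : Int) : Bool :=
  pvPopcGo (PySem.Int.bxor a b).natAbs 0 == 1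

def pvLoop (nums : List Int) (remaining frontier : List Int) : List Int :=
  if frontier.isEmpty then remaining
  else
    let nf := remaining.filter (fun m => frontier.any (fun f => pvAdj m f))
    pvLoop nums (remaining.filter (fun m => !(nf.contains m))) nf
termination_by (remaining.length, if frontier.isEmpty then 0 else 1)
decreasing_by
  simp only [List.unattach_filter, List.unattach_attach]

  by_cases hn : remaining.filter (fun m => frontier.any (fun f => pvAdj m f)) = []
  · rw [hn]
    have h1 : remaining.filter (fun m => !(([] : List Int).contains m)) = remaining := by simp
    rw [h1]
    apply Prod.Lex.right
    simp_all
  · apply Prod.Lex.left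
    rcases List.exists_mem_of_ne_nil _ hn with ⟨a, ha⟩
    have ha' : a ∈ remaining := List.mem_of_mem_filter ha
    have hc : (remaining.filter (fun m => frontier.any (fun f => pvAdj m f))).contains a = true := by
      simp only [List.contains_eq_mem, decide_eq_true_eq]
      exact ha
    have h2 := pvFilterLtLength (l := remaining)
      (p := fun _ => true)
      (q := fun m => !((remaining.filter (fun m => frontier.any (fun f => pvAdj m f))).contains m))
      (by intro x _; rfl) ha' rfl (by beta_reduce; rw [hc]; rfl)
    rw [List.filter_true] at h2
    exact h2

def giantComponentExists_alt (nums : List Int) : Bool :=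
  let vals := nums.foldl (fun acc n => if n ∈ acc then acc else acc ++ [n]) ([] : List Int)
  match PySem.List.min? nums (fun x => x) with
  | none => false   -- Python: min([]) raises ValueError; excluded by Pre_
  | some start =>
    let remaining := vals.filter (fun v => !(v == start))
    (pvLoop nums remaining [start]).isEmpty

-- ===== PRECONDITION & SPEC =====

-- Pre_ excludes only the empty list, on which Python's A raises ValueError (min of empty sequence).
def Pre_giantComponentExists (nums : List Int) : Prop := nums ≠ []
instance (nums : List Int) : Decidable (Pre_giantComponentExists nums) := by
  unfold Pre_giantComponentExists; infer_instance

def pvWitness_giantComponentExists : List Int := [0, 1]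

def Spec_giantComponentExists (nums : List Int) (out : Bool) : Prop := out = giantComponentExists_alt nums
instance (nums : List Int) (out : Bool) : Decidable (Spec_giantComponentExists nums out) := by
  unfold Spec_giantComponentExists; infer_instance

-- ===== CLAIM (what is proved, stated in full; the proofs are below) =====
def Claim_equal_giantComponentExists : Prop := ∀ (nums : List Int), Dom_giantComponentExists nums → Pre_giantComponentExists nums → Spec_giantComponentExists nums (giantComponentExists nums)

-- ===== LEMMAS AND PROOFS =====

-- bit-count bridge
theorem pvCountGo (l : List Char) (c : Char) (fuel acc : Nat) (h : l.length ≤ fuel) :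
    PySem.Chars.count.go [c] fuel l acc = acc + l.count c := by
  induction l generalizing fuel acc with
  | nil => cases fuel <;> simp [PySem.Chars.count.go]
  | cons x t ih =>
    cases fuel with
    | zero => simp at h
    | succ f =>
      rw [PySem.Chars.count.go]
      by_cases hx : x = c
      · subst hx; simp [List.isPrefixOf, ih f (acc+1) (by simpa using h)]
        omega
      · simp [List.isPrefixOf, hx, ih f acc (by simp at h; omega)]
        exact fun h => (hx h.symm).elim

theorem pvDigitsCount (fuel n : Nat) (ds : List Char) (h : n < 2 ^ fuel) :
    (Nat.toDigitsCore 2 fuel n ds).count '1' = PySem.Int.bitCount (n : Int) + ds.count '1' := by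
  induction fuel generalizing n ds with
  | zero => interval_cases n; simp [Nat.toDigitsCore]
  | succ f ih =>
    rw [Nat.toDigitsCore]
    by_cases h0 : n / 2 = 0
    · simp only [h0, if_true]
      have hd0 : Nat.digitChar 0 = '0' := by decide
      have hd1 : Nat.digitChar 1 = '1' := by decide
      have hb1 : PySem.Int.bitCount (1:Int) = 1 := by decide
      have hn : n ≤ 1 := by omega
      interval_cases n <;>
        simp [List.count_cons, hd0, hd1, hb1, PySem.Int.bitCount_natCast_zero] <;> omega
    · simp only [h0, if_false]
      rw [ih (n/2) _ (by omega)]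
      have hb : PySem.Int.bitCount (n:Int) = n % 2 + PySem.Int.bitCount ((n/2 : Nat) : Int) :=
        PySem.Int.bitCount_natCast (by omega)
      have hd0 : Nat.digitChar 0 = '0' := by decide
      have hd1 : Nat.digitChar 1 = '1' := by decide
      rcases Nat.mod_two_eq_zero_or_one n with h2|h2 <;>
        simp [h2, hd0, hd1, List.count_cons, hb] <;> omega

theorem pvCountOnes (x : Int) : PySem.Str.count (PySem.Int.pyBin x) "1" = PySem.Int.bitCount x := by
  have hs : PySem.Str.count (PySem.Int.pyBin x) "1" = PySem.Chars.count (PySem.Int.toBinChars0b x) ['1'] := by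
    simp [PySem.Str.count, PySem.Int.toList_pyBin]
  rw [hs]
  have hgo : ∀ (l : List Char), PySem.Chars.count l ['1'] = l.count '1' := by
    intro l; simp [PySem.Chars.count]; simpa using pvCountGo l '1' l.length 0 le_rfl
  rw [hgo]
  unfold PySem.Int.toBinChars0b
  split
  · next hneg =>
    simp [Nat.toDigits]
    rw [pvDigitsCount (x.natAbs + 1) x.natAbs [] (Nat.lt_two_pow_self.trans (by apply Nat.pow_lt_pow_right <;> omega))]
    have h2 : ((x.natAbs : Int)) = -x := by omega
    simp [h2, PySem.Int.bitCount_neg]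
  · next hpos =>
    simp [Nat.toDigits]
    rw [pvDigitsCount (x.toNat + 1) x.toNat [] (Nat.lt_two_pow_self.trans (by apply Nat.pow_lt_pow_right <;> omega))]
    have h2 : ((x.toNat : Int)) = x := by omega
    simp [h2]

theorem pvCondA_iff (a b : Int) :
    pvCondA a b = true ↔ PySem.Int.bitCount (PySem.Int.bxor a b) = 1 := by
  unfold pvCondA
  simp only [beq_iff_eq]
  rw [pvCountOnes]

theorem pvPopcGo_eq (t c : Nat) : pvPopcGo t c = c + PySem.Int.bitCount (t : Int) := by
  induction t, c using pvPopcGo.induct with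
  | case1 c => rw [pvPopcGo]; simp [PySem.Int.bitCount_natCast_zero]
  | case2 t c h ih =>
    rw [pvPopcGo]
    simp only [h, if_false]
    rw [ih, Nat.shiftRight_one, Nat.and_one_is_mod]
    have hb : PySem.Int.bitCount (t : Int) = t % 2 + PySem.Int.bitCount ((t/2 : Nat) : Int) :=
      PySem.Int.bitCount_natCast (by omega)
    omega

theorem pvBitCount_natAbs (x : Int) :
    PySem.Int.bitCount ((x.natAbs : Int)) = PySem.Int.bitCount x := by
  rcases le_or_gt 0 x with h | h
  · rw [Int.natAbs_of_nonneg h]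
  · have h2 : ((x.natAbs : Int)) = -x := by omega
    rw [h2, PySem.Int.bitCount_neg]

theorem pvAdj_iff (a b : Int) :
    pvAdj a b = true ↔ PySem.Int.bitCount (PySem.Int.bxor a b) = 1 := by
  unfold pvAdj
  rw [pvPopcGo_eq, pvBitCount_natAbs]
  simp

-- the adjacency relation and reachability from the start node
def pvRel (nums : List Int) (a b : Int) : Prop :=
  a ∈ nums ∧ b ∈ nums ∧ PySem.Int.bitCount (PySem.Int.bxor a b) = 1

def pvGood (nums : List Int) (m0 x : Int) : Prop :=
  x ∈ nums ∧ Relation.ReflTransGen (pvRel nums) m0 x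

theorem pvBfs_spec (nums : List Int) (m0 : Int)
    (hg : ∀ v m : Int, m ∈ (pvGraph nums).getD v [] → m ∈ nums) :
    ∀ (fringe : List Int) (visited : PySem.Set Int) (hf : ∀ x ∈ fringe, x ∈ nums),
    visited.Nodup →
    (∀ v ∈ visited, pvGood nums m0 v) →
    (∀ v ∈ fringe, pvGood nums m0 v) →
    (∀ v ∈ visited, ∀ m, pvRel nums v m → m ∈ visited ∨ m ∈ fringe) →
    (m0 ∈ visited ∨ m0 ∈ fringe) →
    (pvBfs nums (pvGraph nums) hg fringe visited hf).Nodup ∧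
      (∀ x, x ∈ pvBfs nums (pvGraph nums) hg fringe visited hf ↔ pvGood nums m0 x) := by
  intro fringe visited hf
  induction fringe, visited, hf using pvBfs.induct nums (pvGraph nums) hg with
  | case1 visited hf _ =>
    intro hnd hvg _ hcl hm0
    rw [pvBfs]
    refine ⟨hnd, fun x => ⟨fun hx => hvg x hx, ?_⟩⟩
    rintro ⟨hxn, hreach⟩
    have hm0v : m0 ∈ visited := by
      rcases hm0 with h | h
      · exact h
      · simp at h
    clear hxn
    induction hreach with
    | refl => exact hm0v
    | tail hab hrel ih =>
      rcases hcl _ ih _ hrel with h | h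
      · exact h
      · simp at h
  | case2 visited f rest hf _ ih =>
    intro hnd hvg hfg hcl hm0
    have hgf : pvGood nums m0 f := hfg f List.mem_cons_self
    rw [pvBfs]
    apply ih
    · exact PySem.Set.nodup_add _ _ hnd
    · intro v hv
      rcases (PySem.Set.mem_add _ _ _).mp hv with h | rfl
      · exact hvg v h
      · exact hgf
    · intro v hv
      rcases List.mem_append.mp hv with h | h
      · exact hfg v (List.mem_cons_of_mem _ h)
      · have hm := List.mem_of_mem_filter h
        rcases (pvGraph_getD_mem nums f v).mp hm with ⟨h1, h2, h3⟩
        exact ⟨h2, hgf.2.tail ⟨h1, h2, (pvCondA_iff f v).mp h3⟩⟩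
    · intro v hv m hrel
      rcases (PySem.Set.mem_add _ _ _).mp hv with h | rfl
      · rcases hcl v h m hrel with h2 | h2
        · exact Or.inl ((PySem.Set.mem_add _ _ _).mpr (Or.inl h2))
        · rcases List.mem_cons.mp h2 with rfl | h3
          · exact Or.inl ((PySem.Set.mem_add _ _ _).mpr (Or.inr rfl))
          · exact Or.inr (List.mem_append.mpr (Or.inl h3))
      · have hm : m ∈ (pvGraph nums).getD v [] :=
          (pvGraph_getD_mem nums v m).mpr ⟨hrel.1, hrel.2.1, (pvCondA_iff v m).mpr hrel.2.2⟩
        by_cases hmv : m ∈ visited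
        · exact Or.inl ((PySem.Set.mem_add _ _ _).mpr (Or.inl hmv))
        · refine Or.inr (List.mem_append.mpr (Or.inr ?_))
          rw [List.mem_filter]
          refine ⟨hm, ?_⟩
          simpa using hmv
    · rcases hm0 with h | h
      · exact Or.inl ((PySem.Set.mem_add _ _ _).mpr (Or.inl h))
      · rcases List.mem_cons.mp h with rfl | h2
        · exact Or.inl ((PySem.Set.mem_add _ _ _).mpr (Or.inr rfl))
        · exact Or.inr (List.mem_append.mpr (Or.inl h2))

-- keys of the built graph
theorem pvInner_keys (nums : List Int) (n1 : Int) :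
    ∀ (g : PySem.Dict Int (List Int)), g.contains n1 = true →
    (nums.foldl (fun g n2 => if pvCondA n1 n2 then g.modify n1 [] (· ++ [n2]) else g) g).keys = g.keys := by
  induction nums with
  | nil => intro g _; rfl
  | cons a t ih =>
    intro g hc
    rw [List.foldl_cons]
    by_cases hA : pvCondA n1 a
    · rw [if_pos hA]
      have hk : (g.modify n1 [] (· ++ [a])).keys = g.keys := by
        rw [PySem.Dict.keys_modify, PySem.Dict.keys_insert_of_contains g _ hc]
      have hc' : (g.modify n1 [] (· ++ [a])).contains n1 = true := by
        rw [PySem.Dict.contains_modify]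
        simp
      rw [ih _ hc', hk]
    · rw [if_neg hA]
      exact ih g hc

theorem pvOuter_keys (nums : List Int) :
    ∀ (l : List Int) (g : PySem.Dict Int (List Int)), (∀ a ∈ l, g.contains a = true) →
    (l.foldl (fun g n1 =>
      nums.foldl (fun g n2 => if pvCondA n1 n2 then g.modify n1 [] (· ++ [n2]) else g) g) g).keys = g.keys := by
  intro l
  induction l with
  | nil => intro g _; rfl
  | cons a t ih =>
    intro g hc
    rw [List.foldl_cons]
    have hk : (nums.foldl (fun g n2 => if pvCondA a n2 then g.modify a [] (· ++ [n2]) else g) g).keys = g.keys :=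
      pvInner_keys nums a g (hc a List.mem_cons_self)
    rw [ih _ (fun b hb => ?_), hk]
    rw [PySem.Dict.contains_iff_mem_keys, hk, ← PySem.Dict.contains_iff_mem_keys]
    exact hc b (List.mem_cons_of_mem _ hb)

theorem pvG0_keys (nums : List Int) :
    (nums.foldl (fun g n => g.insert n ([] : List Int)) PySem.Dict.empty).keys
      = PySem.Set.ofList nums := by
  rw [PySem.Dict.keys_foldl_insert nums (fun _ _ => ([] : List Int)) PySem.Dict.empty]
  rw [PySem.Dict.keys_empty, PySem.Set.update_nil_left]

theorem pvGraph_keys (nums : List Int) : (pvGraph nums).keys = PySem.Set.ofList nums := by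
  unfold pvGraph
  rw [pvOuter_keys nums nums _ (fun a ha => ?_), pvG0_keys]
  rw [PySem.Dict.contains_iff_mem_keys, pvG0_keys]
  exact (PySem.Set.mem_ofList nums a).mpr ha

-- B's dedup loop builds set(nums)
theorem pvVals_eq (nums : List Int) :
    nums.foldl (fun acc n => if n ∈ acc then acc else acc ++ [n]) ([] : List Int)
      = PySem.Set.ofList nums := by
  rw [PySem.Set.ofList_eq_foldl]
  congr 1
  funext s x
  rw [PySem.Set.add_eq_ite]

theorem pvLoop_spec (nums : List Int) (start : Int) :
    ∀ (remaining frontier : List Int),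
    (∀ f ∈ frontier, pvGood nums start f) →
    (∀ x ∈ remaining, x ∈ nums) →
    (∀ u v : Int, pvRel nums u v → u ∉ remaining → u ∉ frontier → v ∉ remaining) →
    start ∉ remaining →
    (∀ m ∈ pvLoop nums remaining frontier, m ∈ remaining) ∧
    (∀ x : Int, pvGood nums start x → x ∉ pvLoop nums remaining frontier) ∧
    (∀ x ∈ remaining, x ∉ pvLoop nums remaining frontier → pvGood nums start x) := by
  intro remaining frontier
  induction remaining, frontier using pvLoop.induct with
  | case1 remaining frontier hfe =>
    intro _ _ hclosed hstart
    rw [pvLoop, if_pos hfe]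
    have hfnil : frontier = [] := List.isEmpty_iff.mp hfe
    subst hfnil
    refine ⟨fun m hm => hm, ?_, fun x hx hnx => absurd hx hnx⟩
    rintro x ⟨hxn, hreach⟩
    clear hxn
    induction hreach with
    | refl => exact hstart
    | @tail b c hab hrel ih => exact hclosed b c hrel ih (by simp)
  | case2 remaining frontier hfe nf ih =>
    intro hfg hrn hclosed hstart
    have hnfdef : nf = remaining.filter (fun m => frontier.any (fun f => pvAdj m f)) := by
      simp only [nf, List.unattach_filter, List.unattach_attach]
    simp only [List.unattach_filter, List.unattach_attach] at ih
    rw [hnfdef] at ih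
    rw [pvLoop, if_neg hfe]
    show
      (∀ m ∈ pvLoop nums (remaining.filter (fun m =>
          !((remaining.filter (fun m => frontier.any (fun f => pvAdj m f))).contains m)))
        (remaining.filter (fun m => frontier.any (fun f => pvAdj m f))), m ∈ remaining) ∧
      (∀ x : Int, pvGood nums start x → x ∉ pvLoop nums (remaining.filter (fun m =>
          !((remaining.filter (fun m => frontier.any (fun f => pvAdj m f))).contains m)))
        (remaining.filter (fun m => frontier.any (fun f => pvAdj m f)))) ∧
      (∀ x ∈ remaining, x ∉ pvLoop nums (remaining.filter (fun m =>
          !((remaining.filter (fun m => frontier.any (fun f => pvAdj m f))).contains m)))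
        (remaining.filter (fun m => frontier.any (fun f => pvAdj m f))) → pvGood nums start x)
    have hnf_good : ∀ m ∈ remaining.filter (fun m => frontier.any (fun f => pvAdj m f)),
        pvGood nums start m := by
      intro m hm
      have hmr : m ∈ remaining := List.mem_of_mem_filter hm
      have hadj : ∃ f ∈ frontier, pvAdj m f = true := by
        simpa using (List.of_mem_filter hm)
      rcases hadj with ⟨f, hf, hAdj⟩
      have hgf := hfg f hf
      have hrel : pvRel nums f m :=
        ⟨hgf.1, hrn m hmr, by rw [PySem.Int.bxor_comm]; exact (pvAdj_iff m f).mp hAdj⟩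
      exact ⟨hrel.2.1, hgf.2.tail hrel⟩
    have hIH := ih hnf_good
      (fun x hx => hrn x (List.mem_of_mem_filter hx))
      (by
        intro u v hrel hur huf
        by_cases hurem : u ∈ remaining
        · exfalso
          apply hur
          rw [List.mem_filter]
          refine ⟨hurem, ?_⟩
          beta_reduce
          simp only [List.contains_eq_mem, Bool.not_eq_true', decide_eq_false_iff_not]
          exact huf
        · by_cases hufr : u ∈ frontier
          · intro hvr
            have hvrem : v ∈ remaining := List.mem_of_mem_filter hvr
            have hvnf : v ∈ remaining.filter (fun m => frontier.any (fun f => pvAdj m f)) := by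
              rw [List.mem_filter]
              refine ⟨hvrem, ?_⟩
              rw [List.any_eq_true]
              exact ⟨u, hufr, (pvAdj_iff v u).mpr (by rw [PySem.Int.bxor_comm]; exact hrel.2.2)⟩
            have := List.of_mem_filter hvr
            simp [hvnf] at this
          · intro hvr
            exact hclosed u v hrel hurem hufr (List.mem_of_mem_filter hvr))
      (fun h => hstart (List.mem_of_mem_filter h))
    refine ⟨?_, hIH.2.1, ?_⟩
    · intro m hm
      exact List.mem_of_mem_filter (hIH.1 m hm)
    · intro x hx hnx
      by_cases hx' : x ∈ remaining.filter (fun m =>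
          !((remaining.filter (fun m => frontier.any (fun f => pvAdj m f))).contains m))
      · exact hIH.2.2 x hx' hnx
      · have hxnf : x ∈ remaining.filter (fun m => frontier.any (fun f => pvAdj m f)) := by
          by_contra hxnf
          apply hx'
          rw [List.mem_filter]
          refine ⟨hx, ?_⟩
          beta_reduce
          simp only [List.contains_eq_mem, Bool.not_eq_true', decide_eq_false_iff_not]
          exact hxnf
        exact hnf_good x hxnf

theorem pv_main (nums : List Int) :
    giantComponentExists nums = giantComponentExists_alt nums := by
  unfold giantComponentExists giantComponentExists_alt
  split
  · next hmin => simp only [hmin]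
  · next m0 hmin =>
    simp only [hmin]
    have hm0 : m0 ∈ nums := PySem.List.min?_mem hmin
    -- A side: the BFS visits exactly the reachable nodes
    have hA := pvBfs_spec nums m0 (pvGraph_values_mem nums) [m0] PySem.Set.empty
      (by intro x hx
          rw [List.mem_singleton] at hx
          subst hx
          exact hm0)
      (by simp [PySem.Set.empty])
      (by simp [PySem.Set.empty])
      (by intro v hv
          rw [List.mem_singleton] at hv
          subst hv
          exact ⟨hm0, Relation.ReflTransGen.refl⟩)
      (by simp [PySem.Set.empty])
      (Or.inr (List.mem_singleton_self m0))
    -- B side: the frontier loop empties `remaining` exactly on the reachable nodes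
    rw [pvVals_eq, pvGraph_keys]
    have hmemvals : ∀ x : Int, x ∈ PySem.Set.ofList nums ↔ x ∈ nums :=
      fun x => PySem.Set.mem_ofList nums x
    have hrem0 : ∀ x : Int,
        x ∈ (PySem.Set.ofList nums).filter (fun v => !(v == m0)) ↔ (x ∈ nums ∧ x ≠ m0) := by
      intro x
      rw [List.mem_filter]
      simp [hmemvals x]
    have hB := pvLoop_spec nums m0 ((PySem.Set.ofList nums).filter (fun v => !(v == m0))) [m0]
      (by intro f hf
          rw [List.mem_singleton] at hf
          subst hf
          exact ⟨hm0, Relation.ReflTransGen.refl⟩)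
      (fun x hx => ((hrem0 x).mp hx).1)
      (by intro u v hrel hur huf
          rw [List.mem_singleton] at huf
          exact absurd ((by
            by_contra hne
            exact hur ((hrem0 u).mpr ⟨hrel.1, hne⟩)) : u = m0) huf)
      (fun h => ((hrem0 m0).mp h).2 rfl)
    rw [Bool.eq_iff_iff]
    simp only [beq_iff_eq, PySem.Set.len, PySem.List.len_eq, List.isEmpty_iff, Nat.cast_inj]
    constructor
    · intro hlen
      -- equal sizes force the BFS to have visited every distinct value
      have hvsub : ∀ x ∈ pvBfs nums (pvGraph nums) (pvGraph_values_mem nums) [m0] PySem.Set.empty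
          (by intro x hx
              rw [List.mem_singleton] at hx
              subst hx
              exact hm0), x ∈ PySem.Set.ofList nums := by
        intro x hx
        exact (hmemvals x).mpr ((hA.2 x).mp hx).1
      have hcard : (PySem.Set.ofList nums).toFinset.card ≤ (pvBfs nums (pvGraph nums)
          (pvGraph_values_mem nums) [m0] PySem.Set.empty
          (by intro x hx
              rw [List.mem_singleton] at hx
              subst hx
              exact hm0)).toFinset.card := by
        rw [List.toFinset_card_of_nodup hA.1, List.toFinset_card_of_nodup (PySem.Set.nodup_ofList nums), hlen]
      have hvfin := Finset.eq_of_subset_of_card_le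
        (fun a ha => by
          rw [List.mem_toFinset] at ha ⊢
          exact hvsub a ha) hcard
      have hall : ∀ x ∈ nums, pvGood nums m0 x := by
        intro x hx
        apply (hA.2 x).mp
        rw [← List.mem_toFinset, hvfin, List.mem_toFinset]
        exact (hmemvals x).mpr hx
      by_contra hne
      rcases List.exists_mem_of_ne_nil _ hne with ⟨m, hm⟩
      have hmr := hB.1 m hm
      exact hB.2.1 m (hall m ((hrem0 m).mp hmr).1) hm
    · intro hempty
      -- an emptied `remaining` means every distinct value is reachable
      have hall : ∀ x ∈ nums, pvGood nums m0 x := by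
        intro x hx
        by_cases hxm : x = m0
        · subst hxm
          exact ⟨hx, Relation.ReflTransGen.refl⟩
        · exact hB.2.2 x ((hrem0 x).mpr ⟨hx, hxm⟩) (by rw [hempty]; simp)
      have hiff : ∀ a : Int, a ∈ pvBfs nums (pvGraph nums) (pvGraph_values_mem nums) [m0] PySem.Set.empty
          (by intro x hx
              rw [List.mem_singleton] at hx
              subst hx
              exact hm0) ↔ a ∈ PySem.Set.ofList nums := by
        intro a
        constructor
        · intro ha
          exact (hmemvals a).mpr ((hA.2 a).mp ha).1
        · intro ha
          exact (hA.2 a).mpr (hall a ((hmemvals a).mp ha))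
      exact ((List.perm_ext_iff_of_nodup hA.1 (PySem.Set.nodup_ofList nums)).mpr hiff).length_eq

-- ===== VERDICT (by name: the statement is the Claim_ definition above) =====
theorem giantComponentExists_spec : Claim_equal_giantComponentExists := by
  intro nums _ _
  unfold Spec_giantComponentExists
  exact pv_main nums
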